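-- pv_equiv track=rewrite | github.com/dalleng/Interview-Practice | algo.monster/Shopping options/main.py | getNumberOfOptionsBF
-- ===== SOURCE A (Python) =====
-- def getNumberOfOptionsBF(
--     priceOfJeans, priceOfShoes, priceOfSkirts, priceOfTops, dollars
-- ):
--     priceOfJeans.sort()
--     priceOfShoes.sort()
--     priceOfSkirts.sort()
--     priceOfTops.sort()
--     solutions = 0
--
--     for pj in priceOfJeans:
--         max_pj = dollars - (priceOfShoes[0] + priceOfSkirts[0] + priceOfTops[0])
--         if pj > max_pj:
--             break
--
--         for ps in priceOfShoes:
--             max_ps = dollars - (pj + priceOfSkirts[0] + priceOfTops[0])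
--             if ps > max_ps:
--                 break
--
--             for psk in priceOfSkirts:
--                 max_psk = dollars - (pj + ps + priceOfTops[0])
--                 if psk > max_psk:
--                     break
--
--                 for pt in priceOfTops:
--                     max_pt = dollars - (pj + ps + psk)
--                     if pt > max_pt:
--                         break
--                     else:
--                         solutions += 1
--     return solutions
-- ===== SOURCE B (Python) =====
-- def getNumberOfOptionsBF(
--     priceOfJeans, priceOfShoes, priceOfSkirts, priceOfTops, dollars
-- ):
--     # Pairwise sums: jeans+shoes sorted ascending, skirts+tops sorted descending,
--     # then one merge-style two-pointer pass counts all quadruples with total <= dollars.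
--     ab = sorted(j + s for j in priceOfJeans for s in priceOfShoes)
--     cd = sorted((k + t for k in priceOfSkirts for t in priceOfTops), reverse=True)
--     total = 0
--     i = 0
--     n = len(ab)
--     for c in cd:
--         budget = dollars - c
--         while i < n and ab[i] <= budget:
--             i += 1
--         total += i
--     return total
-- ===== Notes on version B (the rewrite author's own statement) =====
-- stated objective: faster
-- what changed: Instead of four nested break-pruned loops over the sorted lists, B builds the pairwise sums jeans+shoes (sorted ascending) and skirts+tops (sorted descending) and counts all valid quadruples with a single two-pointer merge pass.
import Mathlib
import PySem

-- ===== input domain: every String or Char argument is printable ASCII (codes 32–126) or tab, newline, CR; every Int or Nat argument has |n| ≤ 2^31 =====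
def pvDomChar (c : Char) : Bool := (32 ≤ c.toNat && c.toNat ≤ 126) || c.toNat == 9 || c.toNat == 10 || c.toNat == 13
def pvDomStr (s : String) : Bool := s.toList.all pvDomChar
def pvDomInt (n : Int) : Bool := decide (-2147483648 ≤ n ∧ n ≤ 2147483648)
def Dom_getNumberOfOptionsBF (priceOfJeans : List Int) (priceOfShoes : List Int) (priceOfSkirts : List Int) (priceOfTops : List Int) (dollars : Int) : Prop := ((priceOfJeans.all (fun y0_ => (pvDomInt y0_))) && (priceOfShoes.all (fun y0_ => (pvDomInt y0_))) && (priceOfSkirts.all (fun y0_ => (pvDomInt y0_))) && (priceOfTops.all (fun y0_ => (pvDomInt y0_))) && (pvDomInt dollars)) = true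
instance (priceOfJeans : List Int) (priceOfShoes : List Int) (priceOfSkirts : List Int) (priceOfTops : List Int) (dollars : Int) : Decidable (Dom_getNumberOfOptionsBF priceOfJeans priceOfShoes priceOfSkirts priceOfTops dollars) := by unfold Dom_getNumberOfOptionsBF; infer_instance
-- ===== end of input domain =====

-- ===== PORT A =====
-- B re-counts via sorted pairwise sums and a two-pointer merge instead of A's four nested
-- break-pruned loops (asymptotically faster). NOTE: Python A sorts its four list arguments
-- IN PLACE; B does not mutate its arguments — the equivalence proved here is about the
-- return value only.

-- a Python 'for x in l: if x > limit: break; <body>' loop (each of A's four loops)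
def pvBfold (l : List Int) (limit : Int) (f : Int → Int → Int) (acc : Int) : Int :=
  match l with
  | [] => acc
  | x :: r => if x > limit then acc else pvBfold r limit f (f acc x)

def getNumberOfOptionsBF (priceOfJeans : List Int) (priceOfShoes : List Int) (priceOfSkirts : List Int) (priceOfTops : List Int) (dollars : Int) : Int :=
  let J := PySem.List.sorted priceOfJeans (fun x => x) false
  let S := PySem.List.sorted priceOfShoes (fun x => x) false
  let K := PySem.List.sorted priceOfSkirts (fun x => x) false
  let T := PySem.List.sorted priceOfTops (fun x => x) false
  -- priceOfShoes[0] / priceOfSkirts[0] / priceOfTops[0] after the in-place sort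
  -- (an IndexError on an empty list is excluded by Pre_; the defaults are never used under Pre_)
  let s0 := PySem.List.pyGetD S 0 0
  let sk0 := PySem.List.pyGetD K 0 0
  let t0 := PySem.List.pyGetD T 0 0
  pvBfold J (dollars - (s0 + sk0 + t0)) (fun sol pj =>
    pvBfold S (dollars - (pj + sk0 + t0)) (fun sol ps =>
      pvBfold K (dollars - (pj + ps + t0)) (fun sol psk =>
        pvBfold T (dollars - (pj + ps + psk)) (fun sol _ => sol + 1) sol) sol) sol) 0

-- ===== PORT B =====
-- 'x + y for x in xs for y in ys'
def pvPairSums (xs ys : List Int) : List Int :=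
  xs.flatMap (fun x => ys.map (fun y => x + y))

-- 'while i < n and ab[i] <= thr: i += 1' — consumes the remaining ascending list
def pvAdvance (rem : List Int) (i thr : Int) : List Int × Int :=
  match rem with
  | [] => ([], i)
  | x :: r => if x ≤ thr then pvAdvance r (i + 1) thr else (x :: r, i)

-- 'for c in cd: <advance>; total += i'
def pvGo (cd rem : List Int) (i total dollars : Int) : Int :=
  match cd with
  | [] => total
  | c :: cs =>
      let p := pvAdvance rem i (dollars - c)
      pvGo cs p.1 p.2 (total + p.2) dollars

def getNumberOfOptionsBF_alt (priceOfJeans : List Int) (priceOfShoes : List Int) (priceOfSkirts : List Int) (priceOfTops : List Int) (dollars : Int) : Int :=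
  let ab := PySem.List.sorted (pvPairSums priceOfJeans priceOfShoes) (fun x => x) false
  let cd := PySem.List.sorted (pvPairSums priceOfSkirts priceOfTops) (fun x => x) true
  pvGo cd ab 0 0 dollars

-- ===== PRECONDITION & SPEC =====
-- Pre_ excludes exactly the inputs where A raises IndexError: a nonempty jeans list with an
-- empty shoes/skirts/tops list (A then reads [0] of the empty list).
def Pre_getNumberOfOptionsBF (priceOfJeans : List Int) (priceOfShoes : List Int) (priceOfSkirts : List Int) (priceOfTops : List Int) (dollars : Int) : Prop :=
  priceOfJeans = [] ∨ (priceOfShoes ≠ [] ∧ priceOfSkirts ≠ [] ∧ priceOfTops ≠ [])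
instance (priceOfJeans : List Int) (priceOfShoes : List Int) (priceOfSkirts : List Int) (priceOfTops : List Int) (dollars : Int) : Decidable (Pre_getNumberOfOptionsBF priceOfJeans priceOfShoes priceOfSkirts priceOfTops dollars) := by unfold Pre_getNumberOfOptionsBF; infer_instance

def pvWitness_getNumberOfOptionsBF : List Int × List Int × List Int × List Int × Int :=
  ([1, 4], [2], [3, 1], [2, 5], 10)

def Spec_getNumberOfOptionsBF (priceOfJeans : List Int) (priceOfShoes : List Int) (priceOfSkirts : List Int) (priceOfTops : List Int) (dollars : Int) (out : Int) : Prop := out = getNumberOfOptionsBF_alt priceOfJeans priceOfShoes priceOfSkirts priceOfTops dollars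
instance (priceOfJeans : List Int) (priceOfShoes : List Int) (priceOfSkirts : List Int) (priceOfTops : List Int) (dollars : Int) (out : Int) : Decidable (Spec_getNumberOfOptionsBF priceOfJeans priceOfShoes priceOfSkirts priceOfTops dollars out) := by unfold Spec_getNumberOfOptionsBF; infer_instance

-- ===== CLAIM (what is proved, stated in full; the proofs are below) =====
def Claim_equal_getNumberOfOptionsBF : Prop := ∀ (priceOfJeans : List Int) (priceOfShoes : List Int) (priceOfSkirts : List Int) (priceOfTops : List Int) (dollars : Int), Dom_getNumberOfOptionsBF priceOfJeans priceOfShoes priceOfSkirts priceOfTops dollars → Pre_getNumberOfOptionsBF priceOfJeans priceOfShoes priceOfSkirts priceOfTops dollars → Spec_getNumberOfOptionsBF priceOfJeans priceOfShoes priceOfSkirts priceOfTops dollars (getNumberOfOptionsBF priceOfJeans priceOfShoes priceOfSkirts priceOfTops dollars)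

-- ===== LEMMAS AND PROOFS =====

-- number of elements of l that are ≤ t, as an Int
def pvCnt (l : List Int) (t : Int) : Int := (l.countP (fun x => decide (x ≤ t)) : Int)

-- the common meaning of both programs: nested sums over the ORIGINAL (unsorted) lists
def pvN (J S K T : List Int) (d : Int) : Int :=
  (J.map (fun j => (S.map (fun s => (K.map (fun k => pvCnt T (d - (j + s + k)))).sum)).sum)).sum

lemma pvCnt_nil (t : Int) : pvCnt [] t = 0 := rfl

lemma pvCnt_eq_zero {T : List Int} {t0 thr : Int} (h : ∀ t ∈ T, t0 ≤ t) (hthr : thr < t0) :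
    pvCnt T thr = 0 := by
  unfold pvCnt
  rw [List.countP_eq_zero.2 (fun t ht => by simpa using by have := h t ht; omega)]
  rfl

lemma pvCnt_cons (x : Int) (l : List Int) (t : Int) :
    pvCnt (x :: l) t = pvCnt l t + (if x ≤ t then 1 else 0) := by
  unfold pvCnt
  rw [List.countP_cons]
  by_cases h : x ≤ t <;> simp [h]

-- A's break-pruned loop over a sorted list, body adding g x, equals the full sum
lemma pvBfold_sum (l : List Int) (limit : Int) (f : Int → Int → Int) (g : Int → Int) (acc : Int)
    (hs : l.Pairwise (· ≤ ·))
    (hf : ∀ a x, x ∈ l → f a x = a + g x)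
    (hz : ∀ x ∈ l, limit < x → g x = 0) :
    pvBfold l limit f acc = acc + (l.map g).sum := by
  induction l generalizing acc with
  | nil => simp [pvBfold]
  | cons x r ih =>
      rw [List.pairwise_cons] at hs
      unfold pvBfold
      by_cases hx : x > limit
      · simp only [hx, if_true]
        rw [List.sum_eq_zero]
        · ring
        · intro z hz'
          rw [List.mem_map] at hz'
          obtain ⟨y, hy, rfl⟩ := hz'
          rw [List.mem_cons] at hy
          rcases hy with rfl | hy
          · exact hz y (by simp) hx
          · exact hz y (by simp [hy]) (lt_of_lt_of_le hx (hs.1 y hy))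
      · simp only [hx, if_false]
        rw [ih (f acc x) hs.2 (fun a y hy => hf a y (by simp [hy]))
            (fun y hy hly => hz y (by simp [hy]) hly),
            hf acc x (by simp)]
        simp only [List.map_cons, List.sum_cons]
        ring

-- A's innermost loop: counts the elements ≤ limit of a sorted list
lemma pvBfold_count (l : List Int) (limit acc : Int) (hs : l.Pairwise (· ≤ ·)) :
    pvBfold l limit (fun a _ => a + 1) acc = acc + pvCnt l limit := by
  induction l generalizing acc with
  | nil => simp [pvBfold, pvCnt_nil]
  | cons x r ih =>
      rw [List.pairwise_cons] at hs
      unfold pvBfold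
      by_cases hx : x > limit
      · simp only [hx, if_true]
        rw [pvCnt_eq_zero (t0 := x)
          (fun t ht => by rw [List.mem_cons] at ht; exact ht.elim (fun he => by omega) (fun h => hs.1 t h)) hx]
        ring
      · simp only [hx, if_false]
        rw [ih (acc + 1) hs.2, pvCnt_cons]
        have : x ≤ limit := by omega
        simp [this]; ring

-- the while loop: on a sorted remainder it consumes exactly the elements ≤ thr
lemma pvAdvance_spec (rem : List Int) (i thr : Int) (hs : rem.Pairwise (· ≤ ·)) :
    pvAdvance rem i thr = (rem.filter (fun x => decide (thr < x)), i + pvCnt rem thr) := by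
  induction rem generalizing i with
  | nil => simp [pvAdvance, pvCnt_nil]
  | cons x r ih =>
      rw [List.pairwise_cons] at hs
      unfold pvAdvance
      by_cases hx : x ≤ thr
      · have hnx : ¬ thr < x := by omega
        simp only [hx, if_true]
        rw [ih (i + 1) hs.2]
        rw [pvCnt_cons]
        simp [hnx, hx]
        ring
      · have hnx : thr < x := by omega
        simp only [hx, if_false]
        rw [pvCnt_eq_zero (t0 := x)
          (fun t ht => by rw [List.mem_cons] at ht; exact ht.elim (fun he => by omega) (fun h => hs.1 t h)) hnx]
        rw [List.filter_cons_of_pos (by simpa using hnx), List.filter_eq_self.2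
          (fun y hy => by simp; have := hs.1 y hy; omega)]
        simp

-- split of the ≤-count at an intermediate threshold
lemma pvCnt_split (ab : List Int) (t0 thr : Int) (h : t0 ≤ thr) :
    pvCnt ab t0 + pvCnt (ab.filter (fun x => decide (t0 < x))) thr = pvCnt ab thr := by
  unfold pvCnt
  rw [List.countP_filter, ← Nat.cast_add]
  congr 1
  induction ab with
  | nil => simp
  | cons x r ih =>
      simp only [List.countP_cons]
      have h3 : (t0 < x) ↔ ¬ (x ≤ t0) := by omega
      by_cases h1 : x ≤ t0 <;> by_cases h2 : x ≤ thr <;> simp [h1, h2, h3] <;> omega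

lemma filter_lt_trans (ab : List Int) (t0 thr : Int) (h : t0 ≤ thr) :
    (ab.filter (fun x => decide (t0 < x))).filter (fun x => decide (thr < x))
      = ab.filter (fun x => decide (thr < x)) := by
  rw [List.filter_filter]
  apply List.filter_congr
  intro x _
  by_cases hx : thr < x <;> simp [hx] <;> omega

-- the two-pointer pass: iterating over cd (descending) with remainder = the part of ab above t0
lemma pvGo_spec (cd : List Int) (ab : List Int) (t0 total d : Int)
    (hab : ab.Pairwise (· ≤ ·))
    (hcd : cd.Pairwise (fun a b => b ≤ a))
    (ht0 : ∀ c ∈ cd, t0 ≤ d - c) :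
    pvGo cd (ab.filter (fun x => decide (t0 < x))) (pvCnt ab t0) total d
      = total + (cd.map (fun c => pvCnt ab (d - c))).sum := by
  induction cd generalizing t0 total with
  | nil => simp [pvGo]
  | cons c cs ih =>
      rw [List.pairwise_cons] at hcd
      have hthr : t0 ≤ d - c := ht0 c (by simp)
      unfold pvGo
      rw [pvAdvance_spec _ _ _ (hab.filter _)]
      simp only
      rw [pvCnt_split ab t0 (d - c) hthr, filter_lt_trans ab t0 (d - c) hthr]
      rw [ih (d - c) (total + pvCnt ab (d - c)) hcd.2
        (fun c' hc' => by have := hcd.1 c' hc'; have := ht0 c' (by simp [hc']); omega)]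
      simp; ring

-- sum of F over the pairwise-sum list = the nested double sum
lemma sum_map_pairSums (F : Int → Int) (X Y : List Int) :
    ((pvPairSums X Y).map F).sum = (X.map (fun x => (Y.map (fun y => F (x + y))).sum)).sum := by
  induction X with
  | nil => simp [pvPairSums]
  | cons x xs ih =>
      unfold pvPairSums at *
      simp only [List.flatMap_cons, List.map_append, List.sum_append, List.map_map, List.map_cons,
        List.sum_cons, ih]
      rfl

-- Fubini for list sums
lemma sum_map_swap {α β : Type} (l : List α) (m : List β) (g : α → β → Int) :
    (l.map (fun x => (m.map (fun y => g x y)).sum)).sum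
      = (m.map (fun y => (l.map (fun x => g x y)).sum)).sum := by
  induction l with
  | nil => simp [List.sum_eq_zero]
  | cons x xs ih =>
      simp only [List.map_cons, List.sum_cons, ih]
      rw [PySem.List.sum_map_add_int]

-- pvCnt as an indicator sum
lemma pvCnt_eq_sum (l : List Int) (t : Int) :
    pvCnt l t = (l.map (fun x => if x ≤ t then (1 : Int) else 0)).sum := by
  unfold pvCnt
  rw [← PySem.List.sum_map_ite_one_zero]
  apply congrArg
  apply List.map_congr_left
  intro x _
  simp

-- ===== A equals pvN =====
lemma pvCnt_sorted (l : List Int) (t : Int) :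
    pvCnt (PySem.List.sorted l (fun x => x) false) t = pvCnt l t := by
  unfold pvCnt
  rw [List.Perm.countP_congr (PySem.List.sorted_perm l (fun x => x) false) (fun x _ => rfl)]

lemma sum_map_sorted (l : List Int) (rev : Bool) (g : Int → Int) :
    ((PySem.List.sorted l (fun x => x) rev).map g).sum = (l.map g).sum :=
  List.Perm.sum_eq ((PySem.List.sorted_perm l (fun x => x) rev).map g)

lemma A_eq_pvN (J S K T : List Int) (d : Int)
    (hpre : J = [] ∨ (S ≠ [] ∧ K ≠ [] ∧ T ≠ [])) :
    getNumberOfOptionsBF J S K T d = pvN J S K T d := by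
  rcases hpre with hJ | ⟨hS, hK, hT⟩
  · subst hJ
    simp [getNumberOfOptionsBF, pvN, pvBfold, PySem.List.sorted]
  · unfold getNumberOfOptionsBF
    simp only
    have hJp : (PySem.List.sorted J (fun x => x) false).Pairwise (· ≤ ·) := by
      simpa using PySem.List.sorted_pairwise J (fun x => x)
    have hSp : (PySem.List.sorted S (fun x => x) false).Pairwise (· ≤ ·) := by
      simpa using PySem.List.sorted_pairwise S (fun x => x)
    have hKp : (PySem.List.sorted K (fun x => x) false).Pairwise (· ≤ ·) := by
      simpa using PySem.List.sorted_pairwise K (fun x => x)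
    have hTp : (PySem.List.sorted T (fun x => x) false).Pairwise (· ≤ ·) := by
      simpa using PySem.List.sorted_pairwise T (fun x => x)
    -- heads of the sorted nonempty lists
    obtain ⟨s0, stl, hS'⟩ := List.exists_cons_of_ne_nil
      (fun h => hS ((PySem.List.sorted_eq_nil_iff S (fun x => x) false).1 h))
    obtain ⟨sk0, ktl, hK'⟩ := List.exists_cons_of_ne_nil
      (fun h => hK ((PySem.List.sorted_eq_nil_iff K (fun x => x) false).1 h))
    obtain ⟨t0, ttl, hT'⟩ := List.exists_cons_of_ne_nil
      (fun h => hT ((PySem.List.sorted_eq_nil_iff T (fun x => x) false).1 h))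
    have hs0 : ∀ y ∈ PySem.List.sorted S (fun x => x) false, s0 ≤ y := by
      intro y hy
      have := PySem.List.key_head_sorted_le (xs := S) (key := fun x => x) hS' y
        ((PySem.List.mem_sorted S (fun x => x) false y).1 hy)
      simpa using this
    have hsk0 : ∀ y ∈ PySem.List.sorted K (fun x => x) false, sk0 ≤ y := by
      intro y hy
      have := PySem.List.key_head_sorted_le (xs := K) (key := fun x => x) hK' y
        ((PySem.List.mem_sorted K (fun x => x) false y).1 hy)
      simpa using this
    have ht0 : ∀ y ∈ PySem.List.sorted T (fun x => x) false, t0 ≤ y := by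
      intro y hy
      have := PySem.List.key_head_sorted_le (xs := T) (key := fun x => x) hT' y
        ((PySem.List.mem_sorted T (fun x => x) false y).1 hy)
      simpa using this
    rw [hS', hK', hT']
    rw [PySem.List.pyGetD_zero_cons, PySem.List.pyGetD_zero_cons, PySem.List.pyGetD_zero_cons]
    rw [← hS', ← hK', ← hT']
    -- innermost (tops) loop
    have hinner : ∀ pj ps psk a,
        pvBfold (PySem.List.sorted T (fun x => x) false) (d - (pj + ps + psk))
          (fun sol _ => sol + 1) a
          = a + pvCnt (PySem.List.sorted T (fun x => x) false) (d - (pj + ps + psk)) :=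
      fun pj ps psk a => pvBfold_count _ _ _ hTp
    -- skirts loop
    have hKlev : ∀ pj ps a,
        pvBfold (PySem.List.sorted K (fun x => x) false) (d - (pj + ps + t0))
          (fun sol psk => pvBfold (PySem.List.sorted T (fun x => x) false) (d - (pj + ps + psk))
            (fun sol _ => sol + 1) sol) a
          = a + ((PySem.List.sorted K (fun x => x) false).map
              (fun psk => pvCnt (PySem.List.sorted T (fun x => x) false) (d - (pj + ps + psk)))).sum := by
      intro pj ps a
      apply pvBfold_sum _ _ _ _ _ hKp (fun a psk _ => hinner pj ps psk a)
      intro psk _ hlim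
      exact pvCnt_eq_zero ht0 (by omega)
    -- shoes loop
    have hSlev : ∀ pj a,
        pvBfold (PySem.List.sorted S (fun x => x) false) (d - (pj + sk0 + t0))
          (fun sol ps => pvBfold (PySem.List.sorted K (fun x => x) false) (d - (pj + ps + t0))
            (fun sol psk => pvBfold (PySem.List.sorted T (fun x => x) false) (d - (pj + ps + psk))
              (fun sol _ => sol + 1) sol) sol) a
          = a + ((PySem.List.sorted S (fun x => x) false).map
              (fun ps => ((PySem.List.sorted K (fun x => x) false).map
                (fun psk => pvCnt (PySem.List.sorted T (fun x => x) false)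
                  (d - (pj + ps + psk)))).sum)).sum := by
      intro pj a
      apply pvBfold_sum _ _ _ _ _ hSp (fun a ps _ => hKlev pj ps a)
      intro ps _ hlim
      apply List.sum_eq_zero
      intro z hz
      rw [List.mem_map] at hz
      obtain ⟨psk, hpsk, rfl⟩ := hz
      exact pvCnt_eq_zero ht0 (by have := hsk0 psk hpsk; omega)
    -- jeans loop
    have hJlev :
        pvBfold (PySem.List.sorted J (fun x => x) false) (d - (s0 + sk0 + t0))
          (fun sol pj => pvBfold (PySem.List.sorted S (fun x => x) false) (d - (pj + sk0 + t0))
            (fun sol ps => pvBfold (PySem.List.sorted K (fun x => x) false) (d - (pj + ps + t0))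
              (fun sol psk => pvBfold (PySem.List.sorted T (fun x => x) false) (d - (pj + ps + psk))
                (fun sol _ => sol + 1) sol) sol) sol) 0
          = 0 + ((PySem.List.sorted J (fun x => x) false).map
              (fun pj => ((PySem.List.sorted S (fun x => x) false).map
                (fun ps => ((PySem.List.sorted K (fun x => x) false).map
                  (fun psk => pvCnt (PySem.List.sorted T (fun x => x) false)
                    (d - (pj + ps + psk)))).sum)).sum)).sum := by
      apply pvBfold_sum _ _ _ _ _ hJp (fun a pj _ => hSlev pj a)
      intro pj _ hlim
      apply List.sum_eq_zero
      intro z hz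
      rw [List.mem_map] at hz
      obtain ⟨ps, hps, rfl⟩ := hz
      apply List.sum_eq_zero
      intro z hz
      rw [List.mem_map] at hz
      obtain ⟨psk, hpsk, rfl⟩ := hz
      exact pvCnt_eq_zero ht0 (by have := hs0 ps hps; have := hsk0 psk hpsk; omega)
    rw [hJlev]
    -- strip the sorts: permutations preserve sums and counts
    unfold pvN
    rw [zero_add]
    rw [sum_map_sorted J false]
    apply congrArg
    apply List.map_congr_left
    intro pj _
    rw [sum_map_sorted S false]
    apply congrArg
    apply List.map_congr_left
    intro ps _
    rw [sum_map_sorted K false]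
    apply congrArg
    apply List.map_congr_left
    intro psk _
    exact pvCnt_sorted T _

-- ===== B equals the pairwise-sum form =====
lemma B_eq_sum (J S K T : List Int) (d : Int) :
    getNumberOfOptionsBF_alt J S K T d
      = ((pvPairSums K T).map (fun c => pvCnt (pvPairSums J S) (d - c))).sum := by
  unfold getNumberOfOptionsBF_alt
  simp only
  have habp : (PySem.List.sorted (pvPairSums J S) (fun x => x) false).Pairwise (· ≤ ·) := by
    simpa using PySem.List.sorted_pairwise (pvPairSums J S) (fun x => x)
  have hcdp : (PySem.List.sorted (pvPairSums K T) (fun x => x) true).Pairwise (fun a b => b ≤ a) := by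
    simpa using PySem.List.sorted_pairwise_rev (pvPairSums K T) (fun x => x)
  set ab := PySem.List.sorted (pvPairSums J S) (fun x => x) false with hab
  set cd := PySem.List.sorted (pvPairSums K T) (fun x => x) true with hcd
  set L := ab ++ cd.map (fun c => d - c) with hL
  set t0 := L.foldl min 0 - 1 with ht0
  have hmin := PySem.List.foldl_min_le L 0
  have hlt : ∀ x ∈ ab, t0 < x := by
    intro x hx
    have := hmin.2 x (by rw [hL]; exact List.mem_append_left _ hx)
    omega
  have hcd0 : ∀ c ∈ cd, t0 ≤ d - c := by
    intro c hc
    have := hmin.2 (d - c) (by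
      rw [hL]
      exact List.mem_append_right _ (List.mem_map.2 ⟨c, hc, rfl⟩))
    omega
  have h1 : ab.filter (fun x => decide (t0 < x)) = ab :=
    List.filter_eq_self.2 (fun x hx => by simpa using hlt x hx)
  have h2 : pvCnt ab t0 = 0 := by
    unfold pvCnt
    rw [List.countP_eq_zero.2 (fun x hx => by simpa using by have := hlt x hx; omega)]
    rfl
  have := pvGo_spec cd ab t0 0 d habp hcdp hcd0
  rw [h1, h2] at this
  rw [this, zero_add]
  -- strip the sorts
  rw [hcd, sum_map_sorted _ true]
  apply congrArg
  apply List.map_congr_left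
  intro c _
  rw [hab]
  unfold pvCnt
  rw [List.Perm.countP_congr (PySem.List.sorted_perm (pvPairSums J S) (fun x => x) false)
    (fun x _ => rfl)]

-- ===== the bridge: pvN equals the pairwise-sum form =====
lemma pvN_eq_sum (J S K T : List Int) (d : Int) :
    pvN J S K T d
      = ((pvPairSums K T).map (fun c => pvCnt (pvPairSums J S) (d - c))).sum := by
  -- both sides equal the flat double sum over AB × CD of the indicator of j+s+k+t ≤ d
  have key : ∀ a : Int, ((pvPairSums K T).map (fun c => if a + c ≤ d then (1 : Int) else 0)).sum
      = (K.map (fun k => (T.map (fun t => if a + (k + t) ≤ d then (1 : Int) else 0)).sum)).sum :=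
    fun a => sum_map_pairSums (fun c => if a + c ≤ d then (1 : Int) else 0) K T
  -- LHS
  have lhs : pvN J S K T d
      = ((pvPairSums J S).map (fun a =>
          ((pvPairSums K T).map (fun c => if a + c ≤ d then (1 : Int) else 0)).sum)).sum := by
    unfold pvN
    rw [sum_map_pairSums (fun a => ((pvPairSums K T).map
      (fun c => if a + c ≤ d then (1 : Int) else 0)).sum) J S]
    apply congrArg
    apply List.map_congr_left
    intro j _
    apply congrArg
    apply List.map_congr_left
    intro s _
    rw [key (j + s)]
    apply congrArg
    apply List.map_congr_left
    intro k _
    rw [pvCnt_eq_sum]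
    apply congrArg
    apply List.map_congr_left
    intro t _
    have : t ≤ d - (j + s + k) ↔ j + s + (k + t) ≤ d := by omega
    simp only [this]
  -- RHS
  have rhs : ((pvPairSums K T).map (fun c => pvCnt (pvPairSums J S) (d - c))).sum
      = ((pvPairSums K T).map (fun c =>
          ((pvPairSums J S).map (fun a => if a + c ≤ d then (1 : Int) else 0)).sum)).sum := by
    apply congrArg
    apply List.map_congr_left
    intro c _
    rw [pvCnt_eq_sum]
    apply congrArg
    apply List.map_congr_left
    intro a _
    have : a ≤ d - c ↔ a + c ≤ d := by omega
    simp only [this]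
  rw [lhs, rhs]
  exact sum_map_swap (pvPairSums J S) (pvPairSums K T) (fun a c => if a + c ≤ d then (1 : Int) else 0)

-- ===== VERDICT (by name: the statement is the Claim_ definition above) =====
theorem getNumberOfOptionsBF_spec : Claim_equal_getNumberOfOptionsBF := by
  intro J S K T d _ hpre
  unfold Spec_getNumberOfOptionsBF
  rw [A_eq_pvN J S K T d hpre, pvN_eq_sum, B_eq_sum]
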